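-- pv_equiv track=rewrite | github.com/koustavmandal95/Python_Basic_codes | palindrome.py | palin
-- ===== SOURCE A (Python) =====
-- def palin(s):
--     k=any([i for i in s if i<0])
--     pal_arr=[] # if k=="True" its means negative number are present.
--     if k==False:
--         for i in s:
--             temp=i
--             rev=0
--             while i!=0:
--                 rem=i%10
--                 rev=10*rev+rem
--                 if rev==temp:
--                     pal_arr=pal_arr+[rev]
--                 i=i//10
--     return any(pal_arr)
-- ===== SOURCE B (Python) =====
-- def palin(s):
--     if any(i < 0 for i in s):
--         return False
--     return any(i != 0 and str(i) == str(i)[::-1] for i in s)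
-- ===== Notes on version B (the rewrite author's own statement) =====
-- stated objective: idiomatic
-- what changed: Replaces the arithmetic digit-reversal while-loop with mid-loop equality checks and the accumulated pal_arr list by an early negative guard plus a single any() over string reversal (str(i) == str(i)[::-1]), excluding 0 explicitly.
import Mathlib
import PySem

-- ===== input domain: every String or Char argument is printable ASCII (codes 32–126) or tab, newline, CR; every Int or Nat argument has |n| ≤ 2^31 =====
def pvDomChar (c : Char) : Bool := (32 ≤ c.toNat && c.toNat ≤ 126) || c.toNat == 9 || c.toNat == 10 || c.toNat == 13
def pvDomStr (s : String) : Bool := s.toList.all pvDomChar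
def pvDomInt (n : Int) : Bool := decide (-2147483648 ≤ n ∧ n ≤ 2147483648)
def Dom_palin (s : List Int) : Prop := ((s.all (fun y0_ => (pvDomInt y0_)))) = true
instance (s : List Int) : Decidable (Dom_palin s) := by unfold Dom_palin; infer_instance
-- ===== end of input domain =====

-- B replaces A's arithmetic digit-reversal while-loop (with its mid-loop equality checks and
-- accumulated pal_arr list) by an early negative guard plus a single any() over string reversal.

-- ===== PORT A =====
-- the 'while i!=0' loop body; the 'i < 0' branch is a totality guard only: Python's loop is
-- never entered with a negative i (the k==False guard rules negatives out), it would diverge there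
def palinGo (temp : Int) (i : Int) (rev : Int) (pal : List Int) : List Int :=
  if i = 0 then pal
  else if i < 0 then pal
  else
    let rem := PySem.Int.mod i 10
    let rev' := 10 * rev + rem
    let pal' := if rev' = temp then pal ++ [rev'] else pal
    palinGo temp (PySem.Int.floordiv i 10) rev' pal'
termination_by i.natAbs
decreasing_by
  rw [PySem.Int.floordiv_eq_ediv_of_pos (by omega : (0:Int) < 10)]
  omega

def palin (s : List Int) : Bool :=
  let k := (s.filter (fun i => decide (i < 0))).any (fun i => decide (i ≠ 0))
  let pal := if k = false then s.foldl (fun pal i => palinGo i i 0 pal) [] else []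
  pal.any (fun x => decide (x ≠ 0))

-- ===== PORT B =====
-- str(i) == str(i)[::-1]
def isStrPal (i : Int) : Bool :=
  match PySem.Str.slice? (PySem.Int.toStr i) none none (-1) with
  | some t => PySem.Int.toStr i == t
  | none => false

def palin_alt (s : List Int) : Bool :=
  if s.any (fun i => decide (i < 0)) then false
  else s.any (fun i => decide (i ≠ 0) && isStrPal i)

-- ===== PRECONDITION & SPEC =====
def Spec_palin (s : List Int) (out : Bool) : Prop := out = palin_alt s
instance (s : List Int) (out : Bool) : Decidable (Spec_palin s out) := by unfold Spec_palin; infer_instance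

-- ===== CLAIM (what is proved, stated in full; the proofs are below) =====
def Claim_equal_palin : Prop := ∀ (s : List Int), Dom_palin s → Spec_palin s (palin s)

-- ===== LEMMAS AND PROOFS =====

-- arithmetic digit reversal, the specification of A's inner loop
def revN (n r : Nat) : Nat :=
  if h : n = 0 then r else revN (n / 10) (10 * r + n % 10)
termination_by n
decreasing_by omega

-- A's loop appends temp exactly when the final reversal equals temp: with the invariant
-- r < B and m * B ≤ t, the intermediate value 10*r + m%10 can only hit t at the last step.
theorem palinGo_eq (m : Nat) : ∀ (r B : Nat) (t : Int) (pal : List Int), 0 < m → r < B →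
    (m : Int) * B ≤ t →
    palinGo t (m : Int) (r : Int) pal = pal ++ (if (revN m r : Int) = t then [t] else []) := by
  induction m using Nat.strong_induction_on with
  | _ m IH =>
  intro r B t pal hm hr ht
  have h1 : ¬((m : Int) = 0) := by exact_mod_cast hm.ne'
  have h2 : ¬((m : Int) < 0) := by exact_mod_cast Int.not_lt.mpr (Int.natCast_nonneg m)
  rw [palinGo, if_neg h1, if_neg h2]
  have hmod : PySem.Int.mod (m:Int) 10 = ((m % 10 : Nat) : Int) := by
    exact_mod_cast PySem.Int.mod_natCast m 10
  have hdiv : PySem.Int.floordiv (m:Int) 10 = ((m / 10 : Nat) : Int) := by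
    exact_mod_cast PySem.Int.floordiv_natCast m 10
  have hrev : (10 * (r:Int) + ((m % 10 : Nat) : Int)) = ((10 * r + m % 10 : Nat) : Int) := by
    push_cast; ring
  simp only [hmod, hdiv, hrev]
  by_cases hq : m / 10 = 0
  · rw [hq]
    conv_rhs => rw [revN]
    rw [dif_neg hm.ne']
    simp only [hq]
    conv_rhs => rw [revN]
    rw [dif_pos rfl]
    rw [Nat.cast_zero, palinGo, if_pos rfl]
    split_ifs with h
    · rw [h]
    · simp
  · have hq' : 0 < m / 10 := Nat.pos_of_ne_zero hq
    have hm10 : 10 ≤ m := by omega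
    have hB : (0:Int) ≤ (B:Int) := Int.natCast_nonneg B
    have h10 : (10:Int) ≤ (m:Int) := by exact_mod_cast hm10
    have hlt : ((10 * r + m % 10 : Nat) : Int) < 10 * (B:Int) := by
      exact_mod_cast (by omega : 10 * r + m % 10 < 10 * B)
    have hne : ((10 * r + m % 10 : Nat) : Int) ≠ t := by
      intro h
      nlinarith
    rw [if_neg hne]
    have hkey : ((m / 10 : Nat) : Int) * ((10 * B : Nat) : Int) ≤ t := by
      have hd : 10 * (m / 10) ≤ m := by omega
      have h1' : (m / 10) * (10 * B) ≤ m * B := by nlinarith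
      calc ((m / 10 : Nat) : Int) * ((10 * B : Nat) : Int)
          = ((m / 10 * (10 * B) : Nat) : Int) := by push_cast; ring
        _ ≤ ((m * B : Nat) : Int) := by exact_mod_cast h1'
        _ ≤ t := by push_cast; exact ht
    rw [IH (m / 10) (by omega) (10 * r + m % 10) (10 * B) t pal hq' (by omega) hkey]
    conv_rhs => rw [revN]
    rw [dif_neg hm.ne']

theorem palinGo_elem (i : Int) (hi : 0 ≤ i) (pal : List Int) :
    palinGo i i 0 pal = pal ++ (if 0 < i ∧ (revN i.toNat 0 : Int) = i then [i] else []) := by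
  rcases eq_or_lt_of_le hi with h0 | hpos
  · rw [palinGo]
    simp [← h0]
  · have hc : ((i.toNat : Nat) : Int) = i := Int.toNat_of_nonneg hi
    have h2 := palinGo_eq i.toNat 0 1 i pal (by omega) (by omega)
      (by rw [hc]; simp)
    rw [hc] at h2
    norm_num at h2
    rw [h2]
    simp [hpos]

theorem revN_eq (m : Nat) : ∀ r : Nat,
    revN m r = Nat.ofDigits 10 (Nat.digits 10 m).reverse + r * 10 ^ (Nat.digits 10 m).length := by
  induction m using Nat.strong_induction_on with
  | _ m IH =>
  intro r
  by_cases hm : m = 0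
  · subst hm
    rw [revN]
    simp
  · rw [revN, dif_neg hm]
    rw [IH (m / 10) (by omega)]
    rw [Nat.digits_def' (by norm_num : (1:ℕ) < 10) (Nat.pos_of_ne_zero hm)]
    rw [List.reverse_cons, Nat.ofDigits_append]
    simp [Nat.ofDigits]
    ring

theorem revN_self_iff (m : Nat) (hm : 0 < m) :
    revN m 0 = m ↔ (Nat.digits 10 m).reverse = Nat.digits 10 m := by
  rw [revN_eq]
  simp only [zero_mul, add_zero]
  constructor
  · intro h
    obtain ⟨a, L', hL⟩ := List.exists_cons_of_ne_nil
      (Nat.digits_ne_nil_iff_ne_zero.mpr hm.ne')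
    by_cases ha : a = 0
    · exfalso
      subst ha
      rw [hL, List.reverse_cons, Nat.ofDigits_append_zero] at h
      have hlt : Nat.ofDigits 10 L'.reverse < 10 ^ L'.reverse.length := by
        apply Nat.ofDigits_lt_base_pow_length (by norm_num)
        intro x hx
        exact Nat.digits_lt_base (by norm_num)
          (by rw [hL]; exact List.mem_cons_of_mem _ (List.mem_reverse.mp hx))
      have hge : ¬ (m < 10 ^ L'.length) := by
        rw [← Nat.digits_length_le_iff (by norm_num : (1:ℕ) < 10)]
        rw [hL]
        simp
      rw [h] at hlt
      simp only [List.length_reverse] at hlt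
      omega
    · have hlast : ∀ (L : List ℕ), L = L'.reverse ++ [a] → ∀ h : L ≠ [], L.getLast h ≠ 0 := by
        rintro L rfl h
        rw [List.getLast_append_singleton]
        exact ha
      have hdig := Nat.digits_ofDigits 10 (by norm_num) (Nat.digits 10 m).reverse
        (fun x hx => Nat.digits_lt_base (by norm_num) (List.mem_reverse.mp hx))
        (hlast _ (by rw [hL, List.reverse_cons]))
      rw [h] at hdig
      exact hdig.symm
  · intro h
    rw [h, Nat.ofDigits_digits]

theorem toDigitsCore_eq (f : Nat) : ∀ (n : Nat) (acc : List Char), 0 < n → n < f →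
    Nat.toDigitsCore 10 f n acc = ((Nat.digits 10 n).map Nat.digitChar).reverse ++ acc := by
  induction f with
  | zero => intro n acc h1 h2; omega
  | succ f IH =>
    intro n acc h1 h2
    rw [Nat.digits_def' (by norm_num : (1:ℕ) < 10) h1]
    by_cases hq : n / 10 = 0
    · simp only [Nat.toDigitsCore, hq]
      simp
    · simp only [Nat.toDigitsCore, hq]
      rw [IH (n / 10) _ (Nat.pos_of_ne_zero hq) (by omega)]
      simp

theorem toChars_pos (m : Nat) (hm : 0 < m) :
    PySem.Int.toChars (m : Int) = ((Nat.digits 10 m).map Nat.digitChar).reverse := by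
  rw [PySem.Int.toChars]
  rw [if_neg (Int.not_lt.mpr (Int.natCast_nonneg m))]
  rw [Int.toNat_natCast]
  rw [Nat.toDigits]
  rw [toDigitsCore_eq (m + 1) m [] hm (by omega)]
  simp

theorem map_digitChar_cancel (L : List Nat) (hL : ∀ d ∈ L, d < 10) :
    (L.map Nat.digitChar).map (fun c => c.toNat - 48) = L := by
  induction L with
  | nil => rfl
  | cons d L ih =>
    simp only [List.map_cons, List.cons.injEq]
    refine ⟨?_, ih (fun x hx => hL x (List.mem_cons_of_mem _ hx))⟩
    have hd : d < 10 := hL d List.mem_cons_self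
    interval_cases d <;> decide

theorem map_digitChar_inj {L1 L2 : List Nat} (h1 : ∀ d ∈ L1, d < 10) (h2 : ∀ d ∈ L2, d < 10)
    (h : L1.map Nat.digitChar = L2.map Nat.digitChar) : L1 = L2 := by
  rw [← map_digitChar_cancel L1 h1, ← map_digitChar_cancel L2 h2, h]

theorem isStrPal_iff (m : Nat) (hm : 0 < m) :
    isStrPal (m : Int) = true ↔ (Nat.digits 10 m).reverse = Nat.digits 10 m := by
  unfold isStrPal
  rw [PySem.Str.slice?_none_none_neg_one]
  simp only [beq_iff_eq]
  rw [← String.toList_inj, String.toList_ofList]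
  rw [PySem.Int.toList_toStr, toChars_pos m hm, List.reverse_reverse]
  constructor
  · intro h
    apply map_digitChar_inj
      (fun d hd => Nat.digits_lt_base (by norm_num) (List.mem_reverse.mp hd))
      (fun d hd => Nat.digits_lt_base (by norm_num) hd)
    calc (Nat.digits 10 m).reverse.map Nat.digitChar
        = ((Nat.digits 10 m).map Nat.digitChar).reverse := by rw [List.map_reverse]
      _ = (Nat.digits 10 m).map Nat.digitChar := h
  · intro h
    calc ((Nat.digits 10 m).map Nat.digitChar).reverse
        = (Nat.digits 10 m).reverse.map Nat.digitChar := by rw [List.map_reverse]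
      _ = (Nat.digits 10 m).map Nat.digitChar := by rw [h]

theorem elem_iff (i : Int) (hi : 0 ≤ i) :
    (decide (i ≠ 0) && isStrPal i) = decide (0 < i ∧ (revN i.toNat 0 : Int) = i) := by
  rcases eq_or_lt_of_le hi with h0 | hpos
  · simp [← h0]
  · have hm : 0 < i.toNat := by omega
    have hc : ((i.toNat : Nat) : Int) = i := Int.toNat_of_nonneg hi
    rw [Bool.eq_iff_iff]
    simp only [Bool.and_eq_true, decide_eq_true_eq]
    constructor
    · rintro ⟨-, hp⟩
      refine ⟨hpos, ?_⟩
      rw [← hc] at hp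
      have := (isStrPal_iff i.toNat hm).mp hp
      have := (revN_self_iff i.toNat hm).mpr this
      omega
    · rintro ⟨-, hp⟩
      refine ⟨by omega, ?_⟩
      have hrn : revN i.toNat 0 = i.toNat := by omega
      have := (revN_self_iff i.toNat hm).mp hrn
      rw [← hc]
      exact (isStrPal_iff i.toNat hm).mpr this

theorem fold_eq (s : List Int) (h : ∀ i ∈ s, 0 ≤ i) : ∀ pal,
    s.foldl (fun pal i => palinGo i i 0 pal) pal
      = pal ++ s.flatMap (fun i => if 0 < i ∧ (revN i.toNat 0 : Int) = i then [i] else []) := by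
  induction s with
  | nil => intro pal; simp
  | cons a s ih =>
    intro pal
    simp only [List.foldl_cons, List.flatMap_cons]
    rw [palinGo_elem a (h a List.mem_cons_self) pal]
    rw [ih (fun i hi => h i (List.mem_cons_of_mem _ hi))]
    simp [List.append_assoc]

theorem k_eq (s : List Int) :
    (s.filter (fun i => decide (i < 0))).any (fun i => decide (i ≠ 0))
      = s.any (fun i => decide (i < 0)) := by
  rw [List.any_filter]
  congr 1
  funext i
  by_cases h : i < 0
  · simp only [h, decide_true, Bool.true_and]
    simp
    omega
  · simp [h]

theorem contrib_any (i : Int) (hi : 0 ≤ i) :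
    ((if 0 < i ∧ (revN i.toNat 0 : Int) = i then [i] else []).any fun x => decide (x ≠ 0))
      = (decide (i ≠ 0) && isStrPal i) := by
  rw [elem_iff i hi]
  split_ifs with h
  · simp [h, ne_of_gt h.1]
  · simp [h]

-- ===== VERDICT (by name: the statement is the Claim_ definition above) =====
theorem palin_spec : Claim_equal_palin := by
  unfold Claim_equal_palin
  intro s _
  unfold Spec_palin palin palin_alt
  simp only [k_eq]
  by_cases hneg : s.any (fun i => decide (i < 0)) = true
  · simp [hneg]
  · rw [Bool.not_eq_true] at hneg
    have hall : ∀ i ∈ s, 0 ≤ i := by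
      intro i hi
      by_contra hni
      rw [List.any_eq_false] at hneg
      exact absurd (by simpa using (by omega : i < 0)) (by simpa using hneg i hi)
    simp only [hneg, Bool.false_eq_true, if_false, if_true]
    rw [fold_eq s hall [], List.nil_append, List.any_flatMap]
    refine Bool.eq_iff_iff.mpr ?_
    rw [List.any_eq_true, List.any_eq_true]
    constructor
    · rintro ⟨i, hi, hp⟩
      refine ⟨i, hi, ?_⟩
      rw [← contrib_any i (hall i hi)]
      exact hp
    · rintro ⟨i, hi, hp⟩
      refine ⟨i, hi, ?_⟩
      rw [contrib_any i (hall i hi)]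
      exact hp
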